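-- pv_equiv track=rewrite | github.com/Minoo7/TDDE24 | tenta/omtenta/2018_04_04/code.py | pairwise_add_r
-- ===== SOURCE A (Python) =====
-- def pairwise_add_r(seq1, seq2):
--     if not seq1 and not seq2:
--         return []
--     if seq1 and not seq2:
--         return [seq1[0]] + pairwise_add_r(seq1[1:], [])
--     if not seq1 and seq2:
--         return [seq2[0]] + pairwise_add_r([], seq2[1:])
--     return [seq1[0] + seq2[0]] + pairwise_add_r(seq1[1:], seq2[1:])
-- ===== SOURCE B (Python) =====
-- def pairwise_add_r(seq1, seq2):
--     return [a + b for a, b in zip(seq1, seq2)] + list(seq1[len(seq2):]) + list(seq2[len(seq1):])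
-- ===== Notes on version B (the rewrite author's own statement) =====
-- stated objective: faster
-- what changed: Replaced the per-element three-way branching recursion (whose [head]+recursive-list concatenation is quadratic) by two phases: a zip comprehension summing the common prefix plus the surplus tail taken as a slice.
import Mathlib
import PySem

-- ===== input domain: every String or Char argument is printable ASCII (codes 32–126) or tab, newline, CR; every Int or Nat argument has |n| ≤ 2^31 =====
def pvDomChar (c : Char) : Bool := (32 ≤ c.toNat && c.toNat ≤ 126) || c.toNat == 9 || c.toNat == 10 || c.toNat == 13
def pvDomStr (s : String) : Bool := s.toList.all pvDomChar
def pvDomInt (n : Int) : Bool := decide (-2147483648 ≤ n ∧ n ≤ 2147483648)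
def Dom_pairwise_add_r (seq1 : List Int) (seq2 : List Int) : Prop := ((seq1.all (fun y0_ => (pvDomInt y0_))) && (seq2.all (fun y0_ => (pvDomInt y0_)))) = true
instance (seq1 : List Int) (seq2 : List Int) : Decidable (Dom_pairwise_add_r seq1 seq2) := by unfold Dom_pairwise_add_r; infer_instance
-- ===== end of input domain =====

-- B replaces A's three-way branching recursion (quadratic via [head]+rest concatenation)
-- with one linear zip pass over the common prefix plus the surplus tail as a slice (objective: faster).

-- ===== PORT A =====
def pairwise_add_r (seq1 : List Int) (seq2 : List Int) : List Int :=
  match seq1, seq2 with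
  | [], [] => []
  | x :: xs, [] => x :: pairwise_add_r xs []
  | [], y :: ys => y :: pairwise_add_r [] ys
  | x :: xs, y :: ys => (x + y) :: pairwise_add_r xs ys

-- ===== PORT B =====
def pairwise_add_r_alt (seq1 : List Int) (seq2 : List Int) : List Int :=
  (List.zip seq1 seq2).map (fun p => p.1 + p.2)
    ++ PySem.List.slice seq1 (some (seq2.length : Int)) none
    ++ PySem.List.slice seq2 (some (seq1.length : Int)) none

-- ===== PRECONDITION & SPEC =====
def Spec_pairwise_add_r (seq1 : List Int) (seq2 : List Int) (out : List Int) : Prop := out = pairwise_add_r_alt seq1 seq2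
instance (seq1 : List Int) (seq2 : List Int) (out : List Int) : Decidable (Spec_pairwise_add_r seq1 seq2 out) := by unfold Spec_pairwise_add_r; infer_instance

-- ===== CLAIM (what is proved, stated in full; the proofs are below) =====
def Claim_equal_pairwise_add_r : Prop := ∀ (seq1 : List Int) (seq2 : List Int), Dom_pairwise_add_r seq1 seq2 → Spec_pairwise_add_r seq1 seq2 (pairwise_add_r seq1 seq2)

-- ===== LEMMAS AND PROOFS =====

lemma slice_from_succ (xs : List Int) (n : Nat) :
    PySem.List.slice xs (some ((n : Int) + 1)) none = xs.drop (n + 1) := by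
  have h := PySem.List.slice_from_natCast xs (n + 1)
  push_cast at h
  exact h

lemma pA_nil_right (xs : List Int) : pairwise_add_r xs [] = xs := by
  induction xs with
  | nil => simp [pairwise_add_r]
  | cons x xs ih => simp [pairwise_add_r, ih]

lemma pA_nil_left (ys : List Int) : pairwise_add_r [] ys = ys := by
  induction ys with
  | nil => simp [pairwise_add_r]
  | cons y ys ih => simp [pairwise_add_r, ih]

lemma alt_eq (seq1 seq2 : List Int) : pairwise_add_r seq1 seq2 = pairwise_add_r_alt seq1 seq2 := by
  induction seq1 generalizing seq2 with
  | nil =>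
    cases seq2 with
    | nil => simp [pairwise_add_r, pairwise_add_r_alt]
    | cons y ys =>
      simp [pairwise_add_r_alt, slice_from_succ, pA_nil_left]
  | cons x xs ih =>
    cases seq2 with
    | nil =>
      simp [pairwise_add_r, pairwise_add_r_alt, slice_from_succ, pA_nil_right]
    | cons y ys =>
      have h := ih ys
      simpa [pairwise_add_r, pairwise_add_r_alt, PySem.List.slice_from_natCast, slice_from_succ] using h

-- ===== VERDICT (by name: the statement is the Claim_ definition above) =====
theorem pairwise_add_r_spec : Claim_equal_pairwise_add_r := by
  intro s1 s2 _
  exact alt_eq s1 s2
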